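-- pv_equiv track=rewrite | github.com/jyesselm/find_pair | x3dna_json_compare/dssr_comparison.py | to_dssr_res_id
-- ===== SOURCE A (Python) =====
-- def to_dssr_res_id(res_id: str) -> str:
--     """Convert our res_id format to DSSR format.
--
--     Examples:
--         "A-G-103" -> "A.G103"
--         "A-C-10A" -> "A.C10^A"
--         "B-2MG-25" -> "B.2MG25"
--     """
--     parts = res_id.split('-')
--     if len(parts) < 3:
--         return res_id  # Invalid format
--
--     chain = parts[0]
--     name = '-'.join(parts[1:-1])  # Handle names with dashes like "2MG"
--     num_part = parts[-1]
--
--     # Check for insertion code (letter at end)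
--     num = ""
--     insertion = ""
--     for i, c in enumerate(num_part):
--         if c.isdigit() or c == '-':
--             num += c
--         else:
--             insertion = num_part[i:]
--             break
--
--     if not num:
--         num = num_part
--
--     result = f"{chain}.{name}{num}"
--     if insertion:
--         result += f"^{insertion}"
--     return result
-- ===== SOURCE B (Python) =====
-- def to_dssr_res_id(res_id: str) -> str:
--     """Convert our res_id format to DSSR format (sliced, no scanning loop)."""
--     parts = res_id.split('-')
--     if len(parts) < 3:
--         return res_id  # Invalid format
--
--     chain = parts[0]
--     name = '-'.join(parts[1:-1])
--     num_part = parts[-1]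
--
--     # Split num_part into its leading digit run and the rest (the insertion code)
--     # by stripping the digits off the front and slicing at the resulting length.
--     k = len(num_part) - len(num_part.lstrip('0123456789'))
--     num, insertion = num_part[:k], num_part[k:]
--     if not num:
--         num = num_part
--
--     return f"{chain}.{name}{num}" + (f"^{insertion}" if insertion else "")
-- ===== Notes on version B (the rewrite author's own statement) =====
-- stated objective: idiomatic
-- what changed: The character-by-character accumulator loop with enumerate/break is replaced by a loop-free lstrip-and-slice split of num_part into its leading digit run and the remainder (the dead 'or c == "-"' branch, unreachable after splitting on '-', disappears).
import Mathlib
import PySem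

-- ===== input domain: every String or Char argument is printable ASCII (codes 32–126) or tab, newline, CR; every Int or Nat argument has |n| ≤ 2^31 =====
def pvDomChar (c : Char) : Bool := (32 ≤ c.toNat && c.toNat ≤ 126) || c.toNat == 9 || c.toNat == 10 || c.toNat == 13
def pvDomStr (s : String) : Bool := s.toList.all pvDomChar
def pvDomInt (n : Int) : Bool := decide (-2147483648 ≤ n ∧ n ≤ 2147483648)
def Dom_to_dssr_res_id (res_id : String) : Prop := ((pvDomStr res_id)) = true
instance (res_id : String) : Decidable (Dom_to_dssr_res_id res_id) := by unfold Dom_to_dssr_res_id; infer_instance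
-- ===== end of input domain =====

-- B replaces A's character-by-character accumulator loop over num_part with a
-- loop-free lstrip-and-slice split (objective: more idiomatic; same result).

-- ===== PORT A =====
-- A's 'for i, c in enumerate(num_part): … else: insertion = num_part[i:]; break':
-- builds num char by char; at the first char that is neither a digit nor '-',
-- the rest of num_part becomes insertion and the loop stops.
def aScan (l : List Char) (num : List Char) : List Char × List Char :=
  match l with
  | [] => (num, [])
  | c :: rest =>
    if PySem.Chars.isdigit c || c == '-' then aScan rest (num ++ [c])
    else (num, c :: rest)

def to_dssr_res_id (res_id : String) : String :=
  let parts := PySem.Chars.splitOn res_id.toList ['-']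
  if parts.length < 3 then res_id
  else
    let chain := PySem.List.pyGetD parts 0 []
    let name := PySem.Chars.join ['-'] (PySem.List.slice parts (some 1) (some (-1)))
    let numPart := PySem.List.pyGetD parts (-1) []
    let scan := aScan numPart []
    let num0 := scan.1
    let insertion := scan.2
    let num := if num0 = [] then numPart else num0
    let result := chain ++ '.' :: name ++ num
    let result := if insertion = [] then result else result ++ '^' :: insertion
    String.ofList result

-- ===== PORT B =====
def to_dssr_res_id_alt (res_id : String) : String :=
  let parts := PySem.Chars.splitOn res_id.toList ['-']
  if parts.length < 3 then res_id
  else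
    let chain := PySem.List.pyGetD parts 0 []
    let name := PySem.Chars.join ['-'] (PySem.List.slice parts (some 1) (some (-1)))
    let numPart := PySem.List.pyGetD parts (-1) []
    -- Source B's "len(num_part) - len(num_part.lstrip('0123456789'))": lstrip with a
    -- char-set argument drops exactly the leading chars of that set (exact here);
    -- num_part[:k] / num_part[k:] with 0 ≤ k ≤ len(num_part) are take / drop.
    let k := numPart.length -
      (numPart.dropWhile (fun c => c ∈ ['0','1','2','3','4','5','6','7','8','9'])).length
    let num0 := numPart.take k
    let insertion := numPart.drop k
    let num := if num0 = [] then numPart else num0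
    String.ofList (chain ++ '.' :: name ++ num ++
      (if insertion = [] then [] else '^' :: insertion))

-- ===== PRECONDITION & SPEC =====
def Spec_to_dssr_res_id (res_id : String) (out : String) : Prop := out = to_dssr_res_id_alt res_id
instance (res_id : String) (out : String) : Decidable (Spec_to_dssr_res_id res_id out) := by unfold Spec_to_dssr_res_id; infer_instance

-- ===== CLAIM (what is proved, stated in full; the proofs are below) =====
def Claim_equal_to_dssr_res_id : Prop := ∀ (res_id : String), Dom_to_dssr_res_id res_id → Spec_to_dssr_res_id res_id (to_dssr_res_id res_id)

-- ===== LEMMAS AND PROOFS =====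

-- pieces produced by splitting on ['-'] never contain '-'
theorem noDash_go (fuel : Nat) (l cur : List Char) (acc : List (List Char))
    (hl : l.length < fuel) (hcur : '-' ∉ cur) (hacc : ∀ p ∈ acc, '-' ∉ p) :
    ∀ p ∈ PySem.Chars.splitOn.go ['-'] fuel l cur acc, '-' ∉ p := by
  induction fuel generalizing l cur acc with
  | zero => omega
  | succ fuel ih =>
    cases l with
    | nil =>
      intro p hp
      simp only [PySem.Chars.splitOn.go, List.mem_reverse, List.mem_cons] at hp
      rcases hp with h | h
      · subst h; simpa using hcur
      · exact hacc p h
    | cons c rest =>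
      simp only [PySem.Chars.splitOn.go]
      by_cases hpre : List.isPrefixOf ['-'] (c :: rest) = true
      · simp only [hpre, if_true]
        apply ih
        · simp at hl ⊢; omega
        · simp
        · intro p hp
          rcases List.mem_cons.mp hp with h | h
          · subst h; simpa using hcur
          · exact hacc p h
      · simp only [hpre]
        have hc : c ≠ '-' := by
          intro h; subst h; simp [List.isPrefixOf] at hpre
        apply ih
        · simp at hl ⊢; omega
        · intro h
          rcases List.mem_cons.mp h with h | h
          · exact hc h.symm
          · exact hcur h
        · exact hacc

theorem noDash_splitOn (cs : List Char) :
    ∀ p ∈ PySem.Chars.splitOn cs ['-'], '-' ∉ p := by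
  apply noDash_go
  · omega
  · simp
  · simp

-- the element fetched with Python index -1 is a member (or the default)
theorem pyGetD_neg_one_mem {α : Type} (xs : List α) (d : α) :
    PySem.List.pyGetD xs (-1) d ∈ xs ∨ PySem.List.pyGetD xs (-1) d = d := by
  cases xs with
  | nil => right; rfl
  | cons x t =>
    left
    simp only [PySem.List.pyGetD, PySem.List.pyGet?, PySem.List.pyIdx?]
    have h1 : ¬ ((0:Int) ≤ -1) := by omega
    have hcond : -(((x :: t).length : Int)) ≤ -1 := by simp
    have hlt : (x :: t).length - ((-(-1:Int)).toNat) < (x :: t).length := by simp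
    rw [if_neg h1, if_pos hcond]
    simp only [Option.bind_some]
    rw [List.getElem?_eq_getElem hlt]
    simp only [Option.getD_some]
    exact List.getElem_mem _

-- A's scan equals the takeWhile/dropWhile split on dash-free input
theorem aScan_eq (l : List Char) (hl : '-' ∉ l) (num : List Char) :
    aScan l num = (num ++ l.takeWhile PySem.Chars.isdigit, l.dropWhile PySem.Chars.isdigit) := by
  induction l generalizing num with
  | nil => simp [aScan]
  | cons c rest ih =>
    have hc : c ≠ '-' := fun h => hl (h ▸ List.mem_cons_self)
    have hrest : '-' ∉ rest := fun h => hl (List.mem_cons_of_mem _ h)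
    by_cases hd : PySem.Chars.isdigit c = true
    · simp only [aScan, hd, Bool.true_or, if_true, List.takeWhile_cons, List.dropWhile_cons]
      rw [ih hrest]
      simp
    · have hcond : (PySem.Chars.isdigit c || c == '-') = false := by
        simp [hd, hc]
      have hd' : PySem.Chars.isdigit c = false := eq_false_of_ne_true hd
      simp [aScan, hd', hc]

-- B's digit-set membership test is exactly the digit predicate
theorem digitSet_eq (c : Char) :
    (c ∈ ['0','1','2','3','4','5','6','7','8','9']) ↔ (PySem.Chars.isdigit c = true) := by
  simp only [PySem.Chars.isdigit, List.mem_cons, List.not_mem_nil, or_false,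
    Bool.and_eq_true, decide_eq_true_eq]
  constructor
  · rintro (h | h | h | h | h | h | h | h | h | h) <;> subst h <;> exact ⟨by decide, by decide⟩
  · rintro ⟨h1, h2⟩
    have hv1 : 48 ≤ c.toNat := h1
    have hv2 : c.toNat ≤ 57 := h2
    have hc : c = Char.ofNat c.toNat := (Char.ofNat_toNat c).symm
    interval_cases h : c.toNat <;> rw [hc] <;> decide

theorem digitSet_fun_eq :
    (fun c => decide (c ∈ ['0','1','2','3','4','5','6','7','8','9'])) = PySem.Chars.isdigit := by
  funext c
  by_cases h : PySem.Chars.isdigit c = true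
  · simp [(digitSet_eq c).mpr h, h]
  · have hm : c ∉ ['0','1','2','3','4','5','6','7','8','9'] := fun hm => h ((digitSet_eq c).mp hm)
    simp [hm, eq_false_of_ne_true h]

-- B's k-slice pieces are the takeWhile/dropWhile pieces
theorem slice_k_take (p : Char → Bool) (l : List Char) :
    l.take (l.length - (l.dropWhile p).length) = l.takeWhile p := by
  have h := List.takeWhile_append_dropWhile (p := p) (l := l)
  have hlen := congrArg List.length h
  simp only [List.length_append] at hlen
  have hk : l.length - (l.dropWhile p).length = (l.takeWhile p).length := by omega
  rw [hk]
  exact (List.prefix_iff_eq_take.mp (List.takeWhile_prefix p)).symm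

theorem slice_k_drop (p : Char → Bool) (l : List Char) :
    l.drop (l.length - (l.dropWhile p).length) = l.dropWhile p := by
  exact (List.suffix_iff_eq_drop.mp (List.dropWhile_suffix p)).symm

-- ===== VERDICT (by name: the statement is the Claim_ definition above) =====
theorem to_dssr_res_id_spec : Claim_equal_to_dssr_res_id := by
  intro res_id _
  show to_dssr_res_id res_id = to_dssr_res_id_alt res_id
  unfold to_dssr_res_id to_dssr_res_id_alt
  by_cases h3 : (PySem.Chars.splitOn res_id.toList ['-']).length < 3
  · simp only [h3, if_true]
  · simp only [h3, if_false]
    set numPart := PySem.List.pyGetD (PySem.Chars.splitOn res_id.toList ['-']) (-1)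
      ([] : List Char) with hnp
    have hnd : '-' ∉ numPart := by
      rcases pyGetD_neg_one_mem (PySem.Chars.splitOn res_id.toList ['-']) ([] : List Char)
        with h | h
      · exact noDash_splitOn res_id.toList _ (hnp ▸ h)
      · rw [hnp, h]; simp
    rw [digitSet_fun_eq, slice_k_take, slice_k_drop, aScan_eq numPart hnd []]
    by_cases hins : numPart.dropWhile PySem.Chars.isdigit = [] <;>
      simp [hins, List.append_assoc]
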